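-- pv_equiv track=rewrite | github.com/milesmackenzie/python_scripts | project_us_births.py | month_births
-- ===== SOURCE A (Python) =====
-- def month_births(lst_lst):
--     data = lst_lst
--     births_per_month = {}
--
--     for item in data:
--         if item[1] not in births_per_month:
--             births_per_month[item[1]] = item[4]
--         else:
--             births_per_month[item[1]] += item[4]
--
--     return births_per_month
-- ===== SOURCE B (Python) =====
-- def month_births(lst_lst):
--     # Group-by decomposition: first the distinct months in order of first
--     # appearance, then one aggregation pass per month.
--     months = dict.fromkeys(item[1] for item in lst_lst)
--     return {m: sum(item[4] for item in lst_lst if item[1] == m) for m in months}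
-- ===== Notes on version B (the rewrite author's own statement) =====
-- stated objective: alternative
-- what changed: Replaces the single-pass dict assign-or-increment loop by a two-phase group-by: an ordered dedup of the month keys followed by a per-month filtered sum built as a dict comprehension.
import Mathlib
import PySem

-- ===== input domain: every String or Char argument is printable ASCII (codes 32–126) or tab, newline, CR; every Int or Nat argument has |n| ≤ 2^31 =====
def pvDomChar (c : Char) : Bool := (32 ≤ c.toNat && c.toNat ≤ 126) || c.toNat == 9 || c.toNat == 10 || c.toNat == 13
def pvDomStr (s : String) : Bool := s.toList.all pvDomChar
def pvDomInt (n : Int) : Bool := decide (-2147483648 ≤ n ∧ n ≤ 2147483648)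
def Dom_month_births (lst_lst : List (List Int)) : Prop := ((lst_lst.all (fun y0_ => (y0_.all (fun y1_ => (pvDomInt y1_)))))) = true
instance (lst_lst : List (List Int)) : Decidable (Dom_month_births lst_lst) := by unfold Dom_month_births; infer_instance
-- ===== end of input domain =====

-- B replaces A's single-pass assign-or-increment dict loop by a two-phase group-by
-- (ordered dedup of the month keys, then one filtered sum per month); same result, not faster.

-- ===== PORT A =====
def month_births (lst_lst : List (List Int)) : List (Int × Int) :=
  (lst_lst.foldl (fun d item =>
      if d.contains (PySem.List.pyGetD item 1 0) = false then
        d.insert (PySem.List.pyGetD item 1 0) (PySem.List.pyGetD item 4 0)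
      else
        d.modify (PySem.List.pyGetD item 1 0) 0 (fun old => old + PySem.List.pyGetD item 4 0))
    (PySem.Dict.empty : PySem.Dict Int Int)).items

-- ===== PORT B =====
def month_births_alt (lst_lst : List (List Int)) : List (Int × Int) :=
  (PySem.List.dedup (lst_lst.map (fun item => PySem.List.pyGetD item 1 0))).map
    (fun m => (m, ((lst_lst.filter (fun item => PySem.List.pyGetD item 1 0 == m)).map
                     (fun item => PySem.List.pyGetD item 4 0)).sum))

-- ===== PRECONDITION & SPEC =====
-- Pre_ excludes exactly the rows too short for item[1]/item[4]: there Python A raises IndexError.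
def Pre_month_births (lst_lst : List (List Int)) : Prop :=
  ∀ row ∈ lst_lst, 5 ≤ row.length
instance (lst_lst : List (List Int)) : Decidable (Pre_month_births lst_lst) := by
  unfold Pre_month_births; infer_instance

def pvWitness_month_births : List (List Int) := [[0, 1, 2, 3, 4], [9, 1, 9, 9, 6], [7, 2, 0, 0, 5]]

def Spec_month_births (lst_lst : List (List Int)) (out : List (Int × Int)) : Prop := out = month_births_alt lst_lst
instance (lst_lst : List (List Int)) (out : List (Int × Int)) : Decidable (Spec_month_births lst_lst out) := by unfold Spec_month_births; infer_instance

-- ===== CLAIM (what is proved, stated in full; the proofs are below) =====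
def Claim_equal_month_births : Prop := ∀ (lst_lst : List (List Int)), Dom_month_births lst_lst → Pre_month_births lst_lst → Spec_month_births lst_lst (month_births lst_lst)

-- ===== LEMMAS AND PROOFS =====

-- A's branch (fresh key: assign; existing key: +=) is extensionally one `modify` with default 0.
lemma step_eq_modify (d : PySem.Dict Int Int) (k v : Int) :
    (if d.contains k = false then d.insert k v else d.modify k 0 (fun old => old + v))
      = d.modify k 0 (fun old => old + v) := by
  by_cases h : d.contains k = false
  · simp only [h, if_true]
    simp [PySem.Dict.insert, PySem.Dict.modify, h, PySem.Dict.getD_of_not_contains]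
  · simp [h]

-- running total of A's modify-loop
lemma getD_foldl_modify_sum (l : List (List Int)) (d : PySem.Dict Int Int) (m : Int) :
    (l.foldl (fun d item => d.modify (PySem.List.pyGetD item 1 0) 0
        (fun old => old + PySem.List.pyGetD item 4 0)) d).getD m 0
      = d.getD m 0
        + ((l.filter (fun item => PySem.List.pyGetD item 1 0 == m)).map
             (fun item => PySem.List.pyGetD item 4 0)).sum := by
  induction l generalizing d with
  | nil => simp
  | cons x xs ih =>
    simp only [List.foldl_cons, ih, List.filter_cons]
    by_cases h : PySem.List.pyGetD x 1 0 = m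
    · simp [h, add_assoc]
    · simp [h, PySem.Dict.getD_modify, Ne.symm h]

-- ===== VERDICT (by name: the statement is the Claim_ definition above) =====
theorem month_births_spec : Claim_equal_month_births := by
  intro lst _ _
  unfold Spec_month_births month_births month_births_alt
  have hstep : (fun (d : PySem.Dict Int Int) item =>
      if d.contains (PySem.List.pyGetD item 1 0) = false then
        d.insert (PySem.List.pyGetD item 1 0) (PySem.List.pyGetD item 4 0)
      else
        d.modify (PySem.List.pyGetD item 1 0) 0 (fun old => old + PySem.List.pyGetD item 4 0))
      = fun d item =>
          d.modify (PySem.List.pyGetD item 1 0) 0 (fun old => old + PySem.List.pyGetD item 4 0) := by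
    funext d item
    exact step_eq_modify d (PySem.List.pyGetD item 1 0) (PySem.List.pyGetD item 4 0)
  rw [hstep]
  have hnodup : (lst.foldl (fun d item => d.modify (PySem.List.pyGetD item 1 0) 0
      (fun old => old + PySem.List.pyGetD item 4 0)) (PySem.Dict.empty : PySem.Dict Int Int)).keys.Nodup :=
    PySem.Dict.nodup_keys_foldl_modify_key lst (fun item => PySem.List.pyGetD item 1 0) 0
      (fun d item => fun old => old + PySem.List.pyGetD item 4 0) PySem.Dict.empty
      PySem.Dict.nodup_keys_empty
  rw [PySem.Dict.items_eq_map_keys _ hnodup 0,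
      PySem.Dict.keys_foldl_modify_key]
  simp only [PySem.Dict.keys_empty, PySem.Set.update_nil_left, PySem.List.dedup_eq_ofList]
  refine List.map_congr_left (fun m hm => ?_)
  rw [getD_foldl_modify_sum]
  simp
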